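-- pv_equiv track=rewrite | github.com/Badokk/AdventOfCode18 | Python/4_Day/solution.py | findLaziestGuard
-- ===== SOURCE A (Python) =====
-- def findLaziestGuard(guardsToSleepTime):
--     sleepiestGuard = 0
--     sleepiestTime = 0
--     for guard in guardsToSleepTime:
--         sleepTime = 0
--         for sleep in guardsToSleepTime[guard]:
--             sleepTime += sleep[1] - sleep[0]
--         if sleepTime > sleepiestTime:
--             sleepiestGuard = guard
--             sleepiestTime = sleepTime
--     return sleepiestGuard
-- ===== SOURCE B (Python) =====
-- def findLaziestGuard(guardsToSleepTime):
--     totals = [(g, sum(e - s for s, e in ivs)) for g, ivs in guardsToSleepTime.items()]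
--     ranked = sorted(totals, key=lambda t: t[1], reverse=True)
--     if ranked and ranked[0][1] > 0:
--         return ranked[0][0]
--     return 0
-- ===== Notes on version B (the rewrite author's own statement) =====
-- stated objective: alternative
-- what changed: A fuses per-guard totalling with a running-argmax loop over dict lookups; B builds a totals list, stable-sorts it by total descending (stability keeps A's first-encountered tie-break), and reads the answer off the head of the sorted list.
import Mathlib
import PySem

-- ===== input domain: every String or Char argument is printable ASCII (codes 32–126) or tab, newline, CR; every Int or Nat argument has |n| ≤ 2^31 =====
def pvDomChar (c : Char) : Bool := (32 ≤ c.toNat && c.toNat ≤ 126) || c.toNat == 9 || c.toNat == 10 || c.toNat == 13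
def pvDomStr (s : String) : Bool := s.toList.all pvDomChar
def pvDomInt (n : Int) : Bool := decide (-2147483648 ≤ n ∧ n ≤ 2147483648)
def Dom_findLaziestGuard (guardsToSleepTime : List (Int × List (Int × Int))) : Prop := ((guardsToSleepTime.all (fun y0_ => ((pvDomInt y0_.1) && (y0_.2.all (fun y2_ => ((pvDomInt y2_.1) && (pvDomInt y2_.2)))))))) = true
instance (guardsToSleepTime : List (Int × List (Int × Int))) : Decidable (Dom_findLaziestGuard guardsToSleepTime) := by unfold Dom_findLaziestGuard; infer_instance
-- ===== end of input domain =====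

-- B replaces A's fused lookup-and-running-argmax loop by building a totals list and
-- stable-sorting it by total descending, then reading the head; objective: alternative.

-- ===== PORT A =====
-- `for guard in guardsToSleepTime` iterates the dict's keys; `guardsToSleepTime[guard]`
-- is a first-match lookup in the association list (always succeeds: the key is present).
def findLaziestGuard (guardsToSleepTime : List (Int × List (Int × Int))) : Int :=
  (guardsToSleepTime.foldl
    (fun (st : Int × Int) kv =>
      let sleepTime :=
        ((PySem.Dict.mk guardsToSleepTime).getD kv.1 []).foldl
          (fun t sleep => t + (sleep.2 - sleep.1)) 0
      if sleepTime > st.2 then (kv.1, sleepTime) else st)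
    (0, 0)).1

-- ===== PORT B =====
def findLaziestGuard_alt (guardsToSleepTime : List (Int × List (Int × Int))) : Int :=
  let totals := guardsToSleepTime.map
    (fun gv => (gv.1, (gv.2.map (fun se => se.2 - se.1)).sum))
  let ranked := PySem.List.sorted totals (fun t => t.2) true
  match ranked with
  | [] => 0
  | t :: _ => if t.2 > 0 then t.1 else 0

-- ===== PRECONDITION & SPEC =====
-- Pre_ excludes association lists with duplicate guard keys: such inputs cannot arise
-- from a Python dict (the parameter is a dict), and on them A's repeated first-match
-- lookup and B's per-entry totals would read different interval lists.
def Pre_findLaziestGuard (guardsToSleepTime : List (Int × List (Int × Int))) : Prop :=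
  (guardsToSleepTime.map Prod.fst).Nodup
instance (guardsToSleepTime : List (Int × List (Int × Int))) : Decidable (Pre_findLaziestGuard guardsToSleepTime) := by unfold Pre_findLaziestGuard; infer_instance
def pvWitness_findLaziestGuard : (List (Int × List (Int × Int))) := [(7, [(2, 10), (3, 4)]), (9, [(0, 5)])]
def Spec_findLaziestGuard (guardsToSleepTime : List (Int × List (Int × Int))) (out : Int) : Prop := out = findLaziestGuard_alt guardsToSleepTime
instance (guardsToSleepTime : List (Int × List (Int × Int))) (out : Int) : Decidable (Spec_findLaziestGuard guardsToSleepTime out) := by unfold Spec_findLaziestGuard; infer_instance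

-- ===== CLAIM (what is proved, stated in full; the proofs are below) =====
def Claim_equal_findLaziestGuard : Prop := ∀ (guardsToSleepTime : List (Int × List (Int × Int))), Dom_findLaziestGuard guardsToSleepTime → Pre_findLaziestGuard guardsToSleepTime → Spec_findLaziestGuard guardsToSleepTime (findLaziestGuard guardsToSleepTime)

-- ===== LEMMAS AND PROOFS =====
def pvStep (st p : Int × Int) : Int × Int := if st.2 < p.2 then p else st

-- the head of the stable reverse sort is Python's max-with-key (first extremal element)
lemma pvHeadInsertBy (x : Int × Int) (acc : List (Int × Int)) :
    (PySem.List.insertBy (fun a b : Int × Int => decide (b.2 < a.2)) x acc).head?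
      = some (match acc.head? with
              | none => x
              | some y => if y.2 < x.2 then x else y) := by
  cases acc with
  | nil => rfl
  | cons y t =>
      simp only [PySem.List.insertBy, List.head?_cons]
      by_cases h : y.2 < x.2 <;> simp [h]

lemma pvHeadFold (ts : List (Int × Int)) : ∀ (acc : List (Int × Int)) (a : Int × Int),
    acc.head? = some a →
    (ts.foldl (fun acc x =>
        PySem.List.insertBy (fun a b : Int × Int => decide (b.2 < a.2)) x acc) acc).head?
      = some (ts.foldl pvStep a) := by
  induction ts with
  | nil => intro acc a ha; simpa using ha
  | cons x t ih =>
      intro acc a ha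
      simp only [List.foldl_cons]
      refine ih _ (pvStep a x) ?_
      rw [pvHeadInsertBy, ha]
      simp only [pvStep]

lemma pvMaxSome (t : List (Int × Int)) : ∀ x,
    PySem.List.max? (x :: t) (fun p => p.2) = some (t.foldl pvStep x) := by
  induction t with
  | nil => intro x; rfl
  | cons y t' ih =>
      intro x
      have h1 : PySem.List.max? (x :: y :: t') (fun p => p.2)
          = PySem.List.max? (pvStep x y :: t') (fun p => p.2) := by
        simp only [PySem.List.max?, List.foldl_cons, pvStep]
        by_cases h : x.2 < y.2 <;> simp [h]
      rw [h1, ih]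
      simp [List.foldl_cons]

lemma pvHeadSorted (ts : List (Int × Int)) :
    (PySem.List.sorted ts (fun t => t.2) true).head?
      = PySem.List.max? ts (fun t => t.2) := by
  cases ts with
  | nil => rfl
  | cons x t =>
      rw [pvMaxSome, PySem.List.sorted_rev_eq_foldl_insertBy]
      simp only [List.foldl_cons]
      exact pvHeadFold t [x] x rfl

lemma pvFoldConst (ts : List (Int × Int)) (a : Int × Int)
    (h : ∀ p ∈ ts, p.2 ≤ a.2) : ts.foldl pvStep a = a := by
  induction ts with
  | nil => rfl
  | cons x t ih =>
      have hx : ¬ a.2 < x.2 := not_lt.mpr (h x (by simp))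
      simp only [List.foldl_cons, pvStep, if_neg hx]
      exact ih (fun p hp => h p (by simp [hp]))

lemma pvFoldMax (ts : List (Int × Int)) :
    ∀ (a m : Int × Int), PySem.List.max? ts (fun p => p.2) = some m →
      a.2 < m.2 → ts.foldl pvStep a = m := by
  induction ts with
  | nil => intro a m hm; simp [PySem.List.max?] at hm
  | cons x t ih =>
      intro a m hm ha
      rw [pvMaxSome] at hm
      injection hm with hm
      simp only [List.foldl_cons, pvStep]
      by_cases hax : a.2 < x.2
      · rw [if_pos hax]; exact hm
      · rw [if_neg hax]
        cases ht : PySem.List.max? t (fun p => p.2) with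
        | none =>
            rw [(PySem.List.max?_eq_none_iff t _).mp ht] at hm ⊢
            simp only [List.foldl_nil] at hm ⊢
            exact absurd (hm ▸ ha) hax
        | some mt =>
            by_cases hxmt : x.2 < mt.2
            · have hfx : t.foldl pvStep x = mt := ih x mt ht hxmt
              have hmeq : mt = m := by rw [hfx] at hm; exact hm
              exact ih a m (hmeq ▸ ht) ha
            · have hle : ∀ p ∈ t, p.2 ≤ x.2 := fun p hp =>
                le_trans (PySem.List.max?_isMax ht p hp) (not_lt.mp hxmt)
              have hfx : t.foldl pvStep x = x := pvFoldConst t x hle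
              rw [hfx] at hm
              exact absurd (hm ▸ ha) hax

-- A's running-argmax fold equals B's sorted-head selection on the same totals list
lemma pvMain (ts : List (Int × Int)) :
    (ts.foldl pvStep (0, 0)).1 =
      (match PySem.List.sorted ts (fun t => t.2) true with
       | [] => 0
       | t :: _ => if t.2 > 0 then t.1 else 0) := by
  cases hs : PySem.List.sorted ts (fun t => t.2) true with
  | nil =>
      have hts : ts = [] := (PySem.List.sorted_eq_nil_iff ts _ true).mp hs
      subst hts; rfl
  | cons m rest =>
      have hmax : PySem.List.max? ts (fun t => t.2) = some m := by
        rw [← pvHeadSorted, hs]; rfl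
      by_cases hm : (0 : Int) < m.2
      · rw [pvFoldMax ts (0, 0) m hmax hm]
        simp [hm]
      · have hle : ∀ p ∈ ts, p.2 ≤ (0 : Int) :=
          fun p hp => le_trans (PySem.List.max?_isMax hmax p hp) (not_lt.mp hm)
        rw [pvFoldConst ts (0, 0) hle]
        simp [hm]

-- ===== VERDICT (by name: the statement is the Claim_ definition above) =====
theorem findLaziestGuard_spec : Claim_equal_findLaziestGuard := by
  intro d _ hpre
  unfold Spec_findLaziestGuard findLaziestGuard findLaziestGuard_alt
  have hlook : ∀ (st : Int × Int), ∀ kv ∈ d,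
      (fun (st : Int × Int) kv =>
        let sleepTime :=
          ((PySem.Dict.mk d).getD kv.1 []).foldl
            (fun t sleep => t + (sleep.2 - sleep.1)) 0
        if sleepTime > st.2 then (kv.1, sleepTime) else st) st kv
      = pvStep st (kv.1, (kv.2.map (fun se => se.2 - se.1)).sum) := by
    intro st kv hkv
    have hitems : (kv.1, kv.2) ∈ (PySem.Dict.mk d).items := hkv
    have hget : (PySem.Dict.mk d).getD kv.1 [] = kv.2 :=
      PySem.Dict.getD_of_mem_items _ hitems hpre []
    simp only [hget, PySem.List.foldl_add, zero_add, pvStep]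
  rw [PySem.List.foldl_congr_mem d _ _ _ hlook]
  have hmap : d.foldl (fun st kv => pvStep st (kv.1, (kv.2.map (fun se => se.2 - se.1)).sum)) ((0:Int), (0:Int))
      = (d.map (fun gv => (gv.1, (gv.2.map (fun se => se.2 - se.1)).sum))).foldl pvStep (0, 0) :=
    (List.foldl_map).symm
  rw [hmap, pvMain]
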